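-- pv_equiv track=rewrite | github.com/maruthakumar/vertex_market_regime | backtester_v2/ui-centralized/strategies/market_regime/tests/test_cross_sheet_dependency_validation.py | _find_parameter_references
-- ===== SOURCE A (Python) =====
-- from typing import Dict, List, Any, Tuple, Set
--
-- def _find_parameter_references(registry: Dict[str, Set[str]]) -> Dict[str, Dict[str, List[str]]]:
--     """Find parameter references between sheets"""
--     references = {}
--
--     for source_sheet, source_params in registry.items():
--         sheet_references = {}
--
--         for param in source_params:
--             target_sheets = []
--
--             # Look for this parameter in other sheets
--             for target_sheet, target_params in registry.items():
--                 if target_sheet != source_sheet and param in target_params: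
--                     target_sheets.append(target_sheet)
--
--             if target_sheets:
--                 sheet_references[param] = target_sheets
--
--         if sheet_references:
--             references[source_sheet] = sheet_references
--
--     return references
-- ===== SOURCE B (Python) =====
-- def _find_parameter_references(registry):
--     """Find parameter references between sheets (inverted-index, comprehension style)."""
--     # Flatten the registry into (param, owning sheet) pairs, then group into an
--     # inverted index param -> owning sheets (registry order preserved).
--     pairs = [(param, sheet) for sheet, params in registry.items() for param in params]
--     param_to_sheets = {}
--     for param, sheet in pairs:
--         param_to_sheets.setdefault(param, []).append(sheet)
--
--     # Answer every (sheet, param) query by an index lookup; build the result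
--     # by comprehensions, dropping empty entries at each level.
--     pruned = [
--         (sheet, {p: ts for p in params
--                  if (ts := [s for s in param_to_sheets[p] if s != sheet])})
--         for sheet, params in registry.items()
--     ]
--     return {sheet: refs for sheet, refs in pruned if refs}
-- ===== Notes on version B (the rewrite author's own statement) =====
-- stated objective: faster
-- what changed: B flattens the registry into (param, sheet) pairs, groups them once into an inverted index param->owning-sheets, and then builds the result by comprehensions that answer each (sheet, param) query with an index lookup plus a filter, removing A's inner full scan over all sheets per parameter and its append-accumulator loops.
import Mathlib
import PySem

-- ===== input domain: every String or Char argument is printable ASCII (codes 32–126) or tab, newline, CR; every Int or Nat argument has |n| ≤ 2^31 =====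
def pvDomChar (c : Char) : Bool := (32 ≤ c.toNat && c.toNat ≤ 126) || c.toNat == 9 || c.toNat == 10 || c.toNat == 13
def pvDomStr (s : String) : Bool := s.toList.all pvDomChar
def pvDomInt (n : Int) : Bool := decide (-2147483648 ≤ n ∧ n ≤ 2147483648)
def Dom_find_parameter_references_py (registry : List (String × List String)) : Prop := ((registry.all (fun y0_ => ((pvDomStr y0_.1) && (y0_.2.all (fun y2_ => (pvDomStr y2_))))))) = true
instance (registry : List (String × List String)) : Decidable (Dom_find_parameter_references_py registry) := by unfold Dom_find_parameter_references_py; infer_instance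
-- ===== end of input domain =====

-- B replaces A's inner full scan over the registry (per parameter) by a one-pass
-- inverted index param -> owning sheets built from flattened (param, sheet) pairs,
-- and builds the pruned result by comprehensions: faster for many sheets.

-- ===== PORT A =====
-- inner scan: 'for target_sheet, target_params in registry.items(): if …: target_sheets.append(target_sheet)'
def pvScanA (registry : List (String × List String)) (src param : String) : List String :=
  registry.foldl (fun ts p => if p.1 ≠ src ∧ param ∈ p.2 then ts ++ [p.1] else ts) []

def find_parameter_references_py (registry : List (String × List String)) : List (String × List (String × List String)) :=
  registry.foldl (fun refs p =>
    let sheet_refs := p.2.foldl (fun sr param =>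
      let ts := pvScanA registry p.1 param
      if ts ≠ [] then sr ++ [(param, ts)] else sr) []
    if sheet_refs ≠ [] then refs ++ [(p.1, sheet_refs)] else refs) []

-- ===== PORT B =====
-- 'pairs = [(param, sheet) for sheet, params in registry.items() for param in params]'
def pvPairsB (registry : List (String × List String)) : List (String × String) :=
  registry.flatMap (fun p => p.2.map (fun c => (c, p.1)))

-- grouping loop: 'param_to_sheets.setdefault(param, []).append(sheet)'
def pvIndexB (registry : List (String × List String)) : PySem.Dict String (List String) :=
  (pvPairsB registry).foldl (fun d q => d.modify q.1 [] (· ++ [q.2])) PySem.Dict.empty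

def find_parameter_references_py_alt (registry : List (String × List String)) : List (String × List (String × List String)) :=
  let idx := pvIndexB registry
  let pruned := registry.map (fun p =>
    (p.1, p.2.filterMap (fun param =>
      let ts := (idx.getD param []).filter (fun s => s ≠ p.1)
      if ts.isEmpty then none else some (param, ts))))
  pruned.filter (fun r => !r.2.isEmpty)

-- ===== PRECONDITION & SPEC =====
-- Representation invariant of the Python argument dict[str, set[str]]: sheet names
-- (dict keys) are distinct and each parameter set is a duplicate-free list; an
-- association list with repeated keys or a "set" with duplicates denotes no Python
-- dict/set value, so nothing is claimed there.
def Pre_find_parameter_references_py (registry : List (String × List String)) : Prop :=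
  (registry.map Prod.fst).Nodup ∧ ∀ p ∈ registry, p.2.Nodup
instance (registry : List (String × List String)) : Decidable (Pre_find_parameter_references_py registry) := by unfold Pre_find_parameter_references_py; infer_instance

def pvWitness_find_parameter_references_py : (List (String × List String)) :=
  [("s1", ["p1", "p2"]), ("s2", ["p1"]), ("s3", [])]

def Spec_find_parameter_references_py (registry : List (String × List String)) (out : List (String × List (String × List String))) : Prop := out = find_parameter_references_py_alt registry
instance (registry : List (String × List String)) (out : List (String × List (String × List String))) : Decidable (Spec_find_parameter_references_py registry out) := by unfold Spec_find_parameter_references_py; infer_instance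

-- ===== CLAIM (what is proved, stated in full; the proofs are below) =====
def Claim_equal_find_parameter_references_py : Prop := ∀ (registry : List (String × List String)), Dom_find_parameter_references_py registry → Pre_find_parameter_references_py registry → Spec_find_parameter_references_py registry (find_parameter_references_py registry)

-- ===== LEMMAS AND PROOFS =====

-- 'if q(x): yield g(x)' comprehension as filter-then-map
lemma pv_filterMap_ite {α β : Type} (l : List α) (q : α → Bool) (g : α → β) :
    l.filterMap (fun x => if q x then none else some (g x)) =
      (l.filter (fun x => !q x)).map g := by
  induction l with
  | nil => rfl
  | cons a l ih =>
      rw [List.filterMap_cons, List.filter_cons]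
      by_cases h : q a <;> simp [h, ih]

-- one sheet's contribution to the index, read at one key and filtered by ≠ src
lemma pvHead (l : List String) (sheet src param : String) (hl : l.Nodup) :
    (((l.map (fun c => (c, sheet))).filter (fun q => q.1 == param)).map (fun q => q.2)).filter
        (fun s => decide (s ≠ src)) =
      if param ∈ l ∧ sheet ≠ src then [sheet] else [] := by
  induction l with
  | nil => simp
  | cons c cs ihc =>
      have hn := List.nodup_cons.mp hl
      by_cases hc : c = param
      · have hnotin : param ∉ cs := by simpa [hc] using hn.1
        have hz : (cs.map (fun c => (c, sheet))).filter (fun q => q.1 == param) = [] := by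
          simp only [List.filter_eq_nil_iff]
          intro q hq
          obtain ⟨x, hx, rfl⟩ := List.mem_map.mp hq
          simpa using fun h : x = param => hnotin (h ▸ hx)
        by_cases hs : sheet = src <;> simp [hc, hz, hs]
      · have hb : (c == param) = false := by simp [hc]
        simp only [List.map_cons, List.filter_cons, hb, Bool.false_eq_true, if_false]
        rw [ihc hn.2]
        simp [List.mem_cons, Ne.symm hc]

-- the inverted index, read at one key, then filtered by ≠ src, is A's inner scan
lemma pvLookup_eq_scan (registry : List (String × List String))
    (h : ∀ p ∈ registry, p.2.Nodup) (src param : String) :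
    ((pvIndexB registry).getD param []).filter (fun s => s ≠ src) =
      pvScanA registry src param := by
  unfold pvIndexB
  rw [PySem.Dict.getD_foldl_modify_append]
  unfold pvScanA
  rw [PySem.List.foldl_append_ite (p := fun x => x.1 ≠ src ∧ param ∈ x.2) (f := Prod.fst)]
  rw [List.nil_append]
  simp only [PySem.Dict.getD_empty, List.nil_append]
  unfold pvPairsB
  induction registry with
  | nil => simp
  | cons p ps ih =>
      have hps : ∀ q ∈ ps, q.2.Nodup := fun q hq => h q (List.mem_cons_of_mem p hq)
      rw [List.flatMap_cons, List.filter_append, List.map_append, List.filter_append,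
        List.filter_cons, ih hps, pvHead p.2 p.1 src param (h p List.mem_cons_self)]
      by_cases hmem : param ∈ p.2 <;> by_cases hsrc : p.1 = src <;> simp [hmem, hsrc]

-- congruence for filter-then-map, pointwise on the base list
lemma pv_map_filter_congr {α β : Type} (l : List α) (f g : α → β) (p q : α → Bool)
    (hpq : ∀ x ∈ l, p x = q x) (hfg : ∀ x ∈ l, f x = g x) :
    (l.filter p).map f = (l.filter q).map g := by
  rw [List.filter_congr hpq]
  exact List.map_congr_left (fun x hx => hfg x (List.mem_filter.mp hx).1)

-- ===== VERDICT (by name: the statement is the Claim_ definition above) =====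
theorem find_parameter_references_py_spec : Claim_equal_find_parameter_references_py := by
  intro registry _ hpre
  unfold Spec_find_parameter_references_py find_parameter_references_py find_parameter_references_py_alt
  simp only
  -- A's outer append-if loop as filter-then-map, B's map-then-filter as filter-then-map
  rw [PySem.List.foldl_append_ite
    (p := fun p : String × List String =>
      (p.2.foldl (fun sr param =>
        if pvScanA registry p.1 param ≠ [] then sr ++ [(param, pvScanA registry p.1 param)] else sr) []) ≠ [])
    (f := fun p : String × List String =>
      (p.1, p.2.foldl (fun sr param =>
        if pvScanA registry p.1 param ≠ [] then sr ++ [(param, pvScanA registry p.1 param)] else sr) []))]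
  rw [List.nil_append, List.filter_map]
  -- pointwise agreement of the kept entries and of the keep-tests
  have hinner : ∀ p ∈ registry,
      p.2.filterMap (fun param =>
        let ts := ((pvIndexB registry).getD param []).filter (fun s => s ≠ p.1)
        if ts.isEmpty then none else some (param, ts)) =
      p.2.foldl (fun sr param =>
        if pvScanA registry p.1 param ≠ [] then sr ++ [(param, pvScanA registry p.1 param)] else sr) [] := by
    intro p hp
    rw [PySem.List.foldl_append_ite
      (p := fun param => pvScanA registry p.1 param ≠ [])
      (f := fun param => (param, pvScanA registry p.1 param)), List.nil_append]
    simp only [pvLookup_eq_scan registry hpre.2 p.1]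
    rw [pv_filterMap_ite (q := fun param => (pvScanA registry p.1 param).isEmpty)
      (g := fun param => (param, pvScanA registry p.1 param))]
    congr 1
    apply List.filter_congr
    intro param _
    cases hsc : pvScanA registry p.1 param <;> simp
  apply pv_map_filter_congr
  · intro p hp
    simp only [Function.comp]
    rw [hinner p hp]
    cases p.2.foldl (fun sr param =>
      if pvScanA registry p.1 param ≠ [] then sr ++ [(param, pvScanA registry p.1 param)] else sr) [] <;> simp
  · intro p hp
    rw [hinner p hp]
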